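-- pv_equiv track=rewrite | github.com/Air2air/z-beam-generator | versioning/generator.py | _clean_content_for_delimiting
-- ===== SOURCE A (Python) =====
-- def _clean_content_for_delimiting(content: str) -> str:
--     """Clean content by removing existing metadata for delimiting."""
--     lines = content.split('\n')
--     cleaned_lines = []
--     skip_patterns = [
--         'Version Log - Generated:',
--         'Material:',
--         'Component:',
--         'Generator: Z-Beam',
--         'Platform: Darwin',
--         'author:',
--         'material:',
--         'component:',
--         'generated:',
--         'source:'
--     ]
--
--     in_yaml_block = False
--     for line in lines:
--         stripped = line.strip()
--
--         # Track YAML block boundaries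
--         if stripped == '---':
--             in_yaml_block = not in_yaml_block
--             continue
--
--         # Skip metadata patterns
--         if any(pattern in line for pattern in skip_patterns):
--             continue
--
--         # Skip YAML frontmatter
--         if in_yaml_block:
--             continue
--
--         # Skip empty lines at start/end
--         if not stripped and not cleaned_lines:
--             continue
--
--         cleaned_lines.append(line)
--
--     # Remove trailing empty lines
--     while cleaned_lines and not cleaned_lines[-1].strip():
--         cleaned_lines.pop()
--
--     return '\n'.join(cleaned_lines)
-- ===== SOURCE B (Python) =====
-- _SKIP = [
--     'Version Log - Generated:',
--     'Material:',
--     'Component:',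
--     'Generator: Z-Beam',
--     'Platform: Darwin',
--     'author:',
--     'material:',
--     'component:',
--     'generated:',
--     'source:'
-- ]
--
--
-- def _clean_content_for_delimiting(content: str) -> str:
--     """Clean content: excise '---'-delimited YAML blocks by scanning to the
--     closing delimiter, drop metadata lines, then keep the slice between the
--     first and last non-blank surviving lines."""
--     lines = content.split('\n')
--     n = len(lines)
--     body = []
--     i = 0
--     while i < n:
--         if lines[i].strip() == '---':
--             # jump past the matching closing '---' (or to the end)
--             j = i + 1
--             while j < n and lines[j].strip() != '---':
--                 j += 1
--             i = j + 1
--         else: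
--             if not any(p in lines[i] for p in _SKIP):
--                 body.append(lines[i])
--             i += 1
--     kept = [k for k, line in enumerate(body) if line.strip()]
--     if not kept:
--         return ''
--     return '\n'.join(body[kept[0]:kept[-1] + 1])
-- ===== Notes on version B (the rewrite author's own statement) =====
-- stated objective: alternative
-- what changed: A walks line by line with an in_yaml_block boolean toggle, skips leading blanks inline via an emptiness test on the accumulator, and pops trailing blanks afterwards; B excises each YAML block by scanning ahead to the closing delimiter line (index jump, no per-line state flag), then computes the enumerate-indices of non-blank surviving lines and returns the single slice between the first and last such index.
import Mathlib
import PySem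

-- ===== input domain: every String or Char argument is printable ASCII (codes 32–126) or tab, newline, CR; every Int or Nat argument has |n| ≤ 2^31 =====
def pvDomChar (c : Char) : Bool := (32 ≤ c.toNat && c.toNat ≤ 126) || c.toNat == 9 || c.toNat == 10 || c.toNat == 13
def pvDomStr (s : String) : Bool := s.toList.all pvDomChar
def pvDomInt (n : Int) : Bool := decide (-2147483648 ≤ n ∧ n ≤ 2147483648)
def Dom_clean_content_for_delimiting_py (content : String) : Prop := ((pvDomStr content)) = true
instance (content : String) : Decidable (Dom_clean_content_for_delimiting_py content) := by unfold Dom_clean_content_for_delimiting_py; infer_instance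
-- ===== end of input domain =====

-- B excises '---'-delimited YAML blocks by scanning ahead to the closing delimiter (instead of A's per-line boolean toggle), filters metadata lines, and returns the slice between the first and last non-blank surviving lines (instead of A's inline leading skip + trailing pops); objective: alternative decomposition, return value proved equal.


def pvSkipPatterns : List String :=
  ["Version Log - Generated:", "Material:", "Component:", "Generator: Z-Beam",
   "Platform: Darwin", "author:", "material:", "component:", "generated:", "source:"]

-- ===== PORT A =====
-- A's loop body; state = (cleaned_lines, in_yaml_block)
def pvStepA (st : List String × Bool) (line : String) : List String × Bool :=
  let stripped := PySem.Str.strip line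
  if stripped == "---" then (st.1, !st.2)
  else if pvSkipPatterns.any (fun p => PySem.Str.isIn p line) then st
  else if st.2 then st
  else if stripped == "" && st.1.isEmpty then st
  else (st.1 ++ [line], st.2)

-- A's "while cleaned_lines and not cleaned_lines[-1].strip(): cleaned_lines.pop()"
def pvPopTrailing (l : List String) : List String :=
  if h : l = [] then l
  else if PySem.Str.strip (l.getLast h) == "" then pvPopTrailing l.dropLast
  else l
termination_by l.length
decreasing_by
  have : 0 < l.length := List.length_pos_iff.mpr h
  simp [List.length_dropLast]; omega

def clean_content_for_delimiting_py (content : String) : String :=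
  let lines := (PySem.Str.split? content "\n").getD []  -- split? is some here since the separator "\n" ≠ ""
  let st := lines.foldl pvStepA ([], false)
  PySem.Str.join "\n" (pvPopTrailing st.1)

-- ===== PORT B =====
-- B's inner while loop: advance past the matching closing '---' (or to the end)
def pvSkipClose : List String → List String
  | [] => []
  | y :: ys => if PySem.Str.strip y == "---" then ys else pvSkipClose ys

lemma pvSkipClose_length_le (l : List String) : (pvSkipClose l).length ≤ l.length := by
  induction l with
  | nil => simp [pvSkipClose]
  | cons y ys ih =>
    by_cases h : PySem.Str.strip y == "---" <;> simp [pvSkipClose, h] <;> omega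

-- B's outer while loop over the line list (i-indexed in Python; the remaining suffix here)
def pvDropMeta : List String → List String
  | [] => []
  | x :: xs =>
    if PySem.Str.strip x == "---" then pvDropMeta (pvSkipClose xs)
    else if pvSkipPatterns.any (fun p => PySem.Str.isIn p x) then pvDropMeta xs
    else x :: pvDropMeta xs
termination_by l => l.length
decreasing_by
  · have := pvSkipClose_length_le xs; simp; omega
  · simp
  · simp

-- B's "[k for k, line in enumerate(body) if line.strip()]"
def pvKeptIdx (body : List String) : List Int :=
  (PySem.List.enumerate body 0).filterMap
    (fun p => if PySem.Str.strip p.2 == "" then none else some p.1)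

-- B's "if not kept: return ''  /  return '\n'.join(body[kept[0]:kept[-1]+1])"
def pvTrimSlice (body : List String) : List String :=
  match (pvKeptIdx body).head?, (pvKeptIdx body).getLast? with
  | some a, some b => PySem.List.slice body (some a) (some (b + 1))
  | _, _ => []

def clean_content_for_delimiting_py_alt (content : String) : String :=
  let lines := (PySem.Str.split? content "\n").getD []  -- split? is some here since the separator "\n" ≠ ""
  let body := pvDropMeta lines
  PySem.Str.join "\n" (pvTrimSlice body)

-- ===== PRECONDITION & SPEC =====
def Spec_clean_content_for_delimiting_py (content : String) (out : String) : Prop := out = clean_content_for_delimiting_py_alt content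
instance (content : String) (out : String) : Decidable (Spec_clean_content_for_delimiting_py content out) := by unfold Spec_clean_content_for_delimiting_py; infer_instance

-- ===== CLAIM (what is proved, stated in full; the proofs are below) =====
def Claim_equal_clean_content_for_delimiting_py : Prop := ∀ (content : String), Dom_clean_content_for_delimiting_py content → Spec_clean_content_for_delimiting_py content (clean_content_for_delimiting_py content)

-- ===== LEMMAS AND PROOFS =====

-- intermediate reference pass (proof only): A's filter with the blank-edge handling removed
def pvStepB (st : List String × Bool) (line : String) : List String × Bool :=
  if PySem.Str.strip line == "---" then (st.1, !st.2)
  else if !st.2 && !(pvSkipPatterns.any (fun p => PySem.Str.isIn p line)) then (st.1 ++ [line], st.2)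
  else st

def pvPopLeading : List String → List String
  | [] => []
  | x :: xs => if PySem.Str.strip x == "" then pvPopLeading xs else x :: xs

lemma pvPopLeading_append (f l : List String) :
    pvPopLeading (f ++ l) = if pvPopLeading f = [] then pvPopLeading l else pvPopLeading f ++ l := by
  induction f with
  | nil => simp [pvPopLeading]
  | cons x xs ih =>
    by_cases h : PySem.Str.strip x == ""
    · simpa [pvPopLeading, h] using ih
    · simp [pvPopLeading, h]

lemma pvStepA_eq_stepB (f : List String) (y : Bool) (line : String) :
    pvStepA (pvPopLeading f, y) line
      = (pvPopLeading (pvStepB (f, y) line).1, (pvStepB (f, y) line).2) := by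
  by_cases h1 : PySem.Str.strip line == "---"
  · simp [pvStepA, pvStepB, h1]
  · have h2e : (∀ x ∈ pvSkipPatterns, PySem.Chars.isIn x.toList line.toList = false)
        ↔ ¬ ∃ p ∈ pvSkipPatterns, PySem.Chars.isIn p.toList line.toList = true := by simp
    by_cases h2 : ∃ p ∈ pvSkipPatterns, PySem.Chars.isIn p.toList line.toList = true
    · simp [pvStepA, pvStepB, h1, h2, h2e]
    · by_cases h3 : y
      · simp [pvStepA, pvStepB, h1, h2, h3]
      · by_cases h4 : PySem.Str.strip line == ""
        · by_cases h5 : pvPopLeading f = []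
          · have hh : pvPopLeading (f ++ [line]) = [] := by
              simp [pvPopLeading_append, h5, pvPopLeading, h4]
            simp [pvStepA, pvStepB, h1, h2, h3, h4, h5, hh, h2e]
          · have hh : pvPopLeading (f ++ [line]) = pvPopLeading f ++ [line] := by
              simp [pvPopLeading_append, h5]
            simp [pvStepA, pvStepB, h1, h2, h3, h4, h5, hh, h2e]
        · have hh : pvPopLeading (f ++ [line]) = pvPopLeading f ++ [line] := by
            by_cases h5 : pvPopLeading f = [] <;>
              simp [pvPopLeading_append, h5, pvPopLeading, h4]
          by_cases h5 : pvPopLeading f = [] <;>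
            simp [pvStepA, pvStepB, h1, h2, h3, h4, h5, hh, h2e]

lemma foldA_eq (lines : List String) (f : List String) (y : Bool) :
    lines.foldl pvStepA (pvPopLeading f, y)
      = (pvPopLeading (lines.foldl pvStepB (f, y) ).1, (lines.foldl pvStepB (f, y)).2) := by
  induction lines generalizing f y with
  | nil => simp
  | cons line rest ih =>
    simp only [List.foldl_cons]
    rw [pvStepA_eq_stepB]
    exact ih (pvStepB (f, y) line).1 (pvStepB (f, y) line).2

-- unfolding lemmas for the recursive definitions
lemma pvSkipClose_cons (y : String) (ys : List String) :
    pvSkipClose (y :: ys) = if PySem.Str.strip y == "---" then ys else pvSkipClose ys := rfl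

lemma pvDropMeta_cons (x : String) (xs : List String) :
    pvDropMeta (x :: xs)
      = if PySem.Str.strip x == "---" then pvDropMeta (pvSkipClose xs)
        else if pvSkipPatterns.any (fun p => PySem.Str.isIn p x) then pvDropMeta xs
        else x :: pvDropMeta xs := by
  rw [pvDropMeta]

-- the toggle fold computes exactly B's scan-ahead pass
lemma foldB_eq_dropMeta (lines : List String) :
    (∀ acc : List String, (lines.foldl pvStepB (acc, false)).1 = acc ++ pvDropMeta lines)
    ∧ (∀ acc : List String, (lines.foldl pvStepB (acc, true)).1 = acc ++ pvDropMeta (pvSkipClose lines)) := by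
  induction lines with
  | nil => constructor <;> intro acc <;> simp [pvDropMeta, pvSkipClose]
  | cons x xs ih =>
    constructor <;> intro acc <;> simp only [List.foldl_cons]
    · by_cases h1 : (PySem.Str.strip x == "---") = true
      · rw [show pvStepB (acc, false) x = (acc, true) by unfold pvStepB; rw [if_pos h1]; rfl]
        rw [ih.2 acc, pvDropMeta_cons, if_pos h1]
      · by_cases h2 : (pvSkipPatterns.any fun p => PySem.Str.isIn p x) = true
        · rw [show pvStepB (acc, false) x = (acc, false) by
            unfold pvStepB; rw [if_neg h1, h2]; simp]
          rw [ih.1 acc, pvDropMeta_cons, if_neg h1, if_pos h2]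
        · simp only [Bool.not_eq_true] at h2
          rw [show pvStepB (acc, false) x = (acc ++ [x], false) by
            unfold pvStepB; rw [if_neg h1, h2]; simp]
          rw [ih.1 (acc ++ [x]), pvDropMeta_cons, if_neg h1, if_neg (by simpa using h2)]
          simp
    · by_cases h1 : (PySem.Str.strip x == "---") = true
      · rw [show pvStepB (acc, true) x = (acc, false) by unfold pvStepB; rw [if_pos h1]; rfl]
        rw [ih.1 acc, show pvSkipClose (x :: xs) = xs by rw [pvSkipClose_cons, if_pos h1]]
      · rw [show pvStepB (acc, true) x = (acc, true) by unfold pvStepB; rw [if_neg h1]; simp]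
        rw [ih.2 acc, show pvSkipClose (x :: xs) = pvSkipClose xs by
          rw [pvSkipClose_cons, if_neg h1]]

-- Nat-indexed version of pvKeptIdx (proof only)
def pvKN : List String → List Nat
  | [] => []
  | x :: xs => if PySem.Str.strip x == "" then (pvKN xs).map (· + 1)
               else 0 :: (pvKN xs).map (· + 1)

lemma pvKeptIdx_eq_kn (f : List String) (s : Int) :
    (PySem.List.enumerate f s).filterMap
      (fun p => if PySem.Str.strip p.2 == "" then none else some p.1)
    = List.map (fun (k : Nat) => s + (k : Int)) (pvKN f) := by
  induction f generalizing s with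
  | nil => simp [PySem.List.enumerate_nil, pvKN]
  | cons x xs ih =>
    rw [PySem.List.enumerate_cons, List.filterMap_cons]
    by_cases h : (PySem.Str.strip x == "") = true
    · rw [show pvKN (x :: xs) = (pvKN xs).map (· + 1) by rw [pvKN, if_pos h]]
      rw [show (if PySem.Str.strip ((s, x) : Int × String).2 == "" then none
            else some ((s, x) : Int × String).1) = (none : Option Int) by rw [if_pos h]]
      rw [ih (s + 1), List.map_map]
      exact List.map_congr_left fun k _ => by simp; push_cast; ring
    · rw [show pvKN (x :: xs) = 0 :: (pvKN xs).map (· + 1) by rw [pvKN, if_neg h]]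
      rw [show (if PySem.Str.strip ((s, x) : Int × String).2 == "" then none
            else some ((s, x) : Int × String).1) = some s by rw [if_neg h]]
      rw [ih (s + 1), List.map_cons, List.map_map]
      rw [List.map_congr_left (l := pvKN xs)
        (f := (fun k : Nat => s + (k : Int)) ∘ (· + 1)) (g := fun k : Nat => s + 1 + (k : Int))
        (fun k _ => by simp; push_cast; ring)]
      simp

lemma pvKN_mem_lt (f : List String) (k : Nat) (h : k ∈ pvKN f) : k < f.length := by
  induction f generalizing k with
  | nil => simp [pvKN] at h
  | cons x xs ih =>
    rw [pvKN] at h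
    by_cases hx : (PySem.Str.strip x == "") = true
    · rw [if_pos hx] at h
      obtain ⟨j, hj, rfl⟩ := List.mem_map.mp h
      have := ih j hj; simp; omega
    · rw [if_neg hx] at h
      rcases List.mem_cons.mp h with rfl | h
      · simp
      · obtain ⟨j, hj, rfl⟩ := List.mem_map.mp h
        have := ih j hj; simp; omega

lemma pvKN_append_singleton (g : List String) (x : String) :
    pvKN (g ++ [x]) = pvKN g ++ (if PySem.Str.strip x == "" then [] else [g.length]) := by
  induction g with
  | nil =>
    by_cases h : (PySem.Str.strip x == "") = true <;> simp [pvKN, h]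
  | cons y g ih =>
    by_cases hy : (PySem.Str.strip y == "") = true
    · rw [List.cons_append, pvKN, if_pos hy, ih, pvKN, if_pos hy]
      by_cases h : (PySem.Str.strip x == "") = true <;> simp [h]
    · rw [List.cons_append, pvKN, if_neg hy, ih, pvKN, if_neg hy]
      by_cases h : (PySem.Str.strip x == "") = true <;> simp [h]

-- Nat version of B's trim
def pvTrimN (f : List String) : List String :=
  match (pvKN f).head?, (pvKN f).getLast? with
  | some a, some b => (f.drop a).take (b + 1 - a)
  | _, _ => []

lemma pvTrimSlice_eq_trimN (f : List String) : pvTrimSlice f = pvTrimN f := by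
  unfold pvTrimSlice pvTrimN pvKeptIdx
  rw [pvKeptIdx_eq_kn f 0]
  simp only [zero_add]
  cases h1 : (pvKN f).head? with
  | none =>
    have h0 : pvKN f = [] := List.head?_eq_none_iff.mp h1
    simp [h0]
  | some a =>
    cases h2 : (pvKN f).getLast? with
    | none =>
      have h0 : pvKN f = [] := List.getLast?_eq_none_iff.mp h2
      simp [h0] at h1
    | some b =>
      rw [List.head?_map, List.getLast?_map, h1, h2]
      simp only [Option.map_some]
      rw [show ((b : Int) + 1) = ((b + 1 : Nat) : Int) by push_cast; ring]
      rw [PySem.List.slice_natCast]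

lemma pvTrimN_cons_blank (x : String) (xs : List String) (h : (PySem.Str.strip x == "") = true) :
    pvTrimN (x :: xs) = pvTrimN xs := by
  unfold pvTrimN
  rw [show pvKN (x :: xs) = (pvKN xs).map (· + 1) by rw [pvKN, if_pos h]]
  rw [List.head?_map, List.getLast?_map]
  cases h1 : (pvKN xs).head? with
  | none =>
    have h0 : pvKN xs = [] := List.head?_eq_none_iff.mp h1
    simp [h0]
  | some a =>
    cases h2 : (pvKN xs).getLast? with
    | none =>
      have h0 : pvKN xs = [] := List.getLast?_eq_none_iff.mp h2
      simp [h0] at h1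
    | some b =>
      simp only [Option.map_some]
      have harith : b + 1 + 1 - (a + 1) = b + 1 - a := by omega
      simp [harith]

lemma pvTrimN_eq_popTrailing : ∀ n (f : List String), f.length = n →
    (∀ x xs, f = x :: xs → ¬ (PySem.Str.strip x == "") = true) →
    pvTrimN f = pvPopTrailing f := by
  intro n
  induction n using Nat.strong_induction_on with
  | _ n ih =>
    intro f hlen hhead
    cases hf : f with
    | nil => rw [pvPopTrailing]; simp [pvTrimN, pvKN]
    | cons z zs =>
      subst hf
      have hne : (z :: zs) ≠ ([] : List String) := by simp
      obtain ⟨g, x, hgx⟩ : ∃ g x, z :: zs = g ++ [x] :=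
        ⟨(z :: zs).dropLast, (z :: zs).getLast hne, (List.dropLast_append_getLast hne).symm⟩
      rw [hgx]
      rw [hgx] at hlen hhead
      by_cases hx : (PySem.Str.strip x == "") = true
      · -- last line blank: both sides discard it
        have hg : g ≠ [] := by
          rintro rfl
          exact hhead x [] rfl hx
        have hkn : pvKN (g ++ [x]) = pvKN g := by
          rw [pvKN_append_singleton, if_pos hx]; simp
        have hpop : pvPopTrailing (g ++ [x]) = pvPopTrailing g := by
          rw [pvPopTrailing]
          have hne2 : (g ++ [x]) ≠ ([] : List String) := by simp
          rw [dif_neg hne2]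
          rw [List.getLast_append_singleton]
          simp [hx]
        have htrim : pvTrimN (g ++ [x]) = pvTrimN g := by
          unfold pvTrimN
          rw [hkn]
          cases h1 : (pvKN g).head? with
          | none =>
            have h0 : pvKN g = [] := List.head?_eq_none_iff.mp h1
            simp [h0]
          | some a =>
            cases h2 : (pvKN g).getLast? with
            | none =>
              have h0 : pvKN g = [] := List.getLast?_eq_none_iff.mp h2
              simp [h0] at h1
            | some b =>
              simp only
              have hb : b < g.length := pvKN_mem_lt g b (List.mem_of_getLast? h2)
              have ha : a < g.length := pvKN_mem_lt g a (List.mem_of_mem_head? h1)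
              rw [List.drop_append_of_le_length (by omega)]
              rw [List.take_append_of_le_length (by simp; omega)]
        rw [htrim, hpop]
        apply ih g.length (by simp at hlen; omega) g rfl
        intro y ys hgy
        apply hhead y (ys ++ [x])
        rw [hgy]; simp
      · -- last line non-blank: both sides keep everything
        have hpop : pvPopTrailing (g ++ [x]) = g ++ [x] := by
          rw [pvPopTrailing]
          have hne2 : (g ++ [x]) ≠ ([] : List String) := by simp
          rw [dif_neg hne2]
          rw [List.getLast_append_singleton]
          simp [hx]
        rw [hpop]
        have hkn : pvKN (g ++ [x]) = pvKN g ++ [g.length] := by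
          rw [pvKN_append_singleton, if_neg hx]
        unfold pvTrimN
        rw [hkn]
        rw [show (pvKN g ++ [g.length]).getLast? = some g.length by simp]
        have hhd : (pvKN g ++ [g.length]).head? = some 0 := by
          cases hg : g with
          | nil => simp [pvKN]
          | cons y ys =>
            have hy : ¬ (PySem.Str.strip y == "") = true := by
              apply hhead y (ys ++ [x]); rw [hg]; simp
            rw [show pvKN (y :: ys) = 0 :: (pvKN ys).map (· + 1) by rw [pvKN, if_neg hy]]
            simp
        rw [hhd]
        simp

lemma pvTrimN_eq_pops (f : List String) : pvTrimN f = pvPopTrailing (pvPopLeading f) := by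
  induction f with
  | nil => rw [show pvPopLeading [] = [] from rfl, pvPopTrailing]; simp [pvTrimN, pvKN]
  | cons x xs ih =>
    by_cases h : (PySem.Str.strip x == "") = true
    · rw [pvTrimN_cons_blank x xs h,
        show pvPopLeading (x :: xs) = pvPopLeading xs by rw [pvPopLeading, if_pos h]]
      exact ih
    · rw [show pvPopLeading (x :: xs) = x :: xs by rw [pvPopLeading, if_neg h]]
      exact pvTrimN_eq_popTrailing (x :: xs).length (x :: xs) rfl
        (by intro y ys heq; cases heq; exact h)

-- ===== VERDICT (by name: the statement is the Claim_ definition above) =====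
theorem clean_content_for_delimiting_py_spec : Claim_equal_clean_content_for_delimiting_py := by
  intro content _
  unfold Spec_clean_content_for_delimiting_py
  unfold clean_content_for_delimiting_py clean_content_for_delimiting_py_alt
  have h1 : ((PySem.Str.split? content "\n").getD []).foldl pvStepA ([], false)
      = (pvPopLeading (((PySem.Str.split? content "\n").getD []).foldl pvStepB ([], false)).1,
         (((PySem.Str.split? content "\n").getD []).foldl pvStepB ([], false)).2) := by
    simpa [pvPopLeading] using foldA_eq ((PySem.Str.split? content "\n").getD []) [] false
  have h2 : (((PySem.Str.split? content "\n").getD []).foldl pvStepB ([], false)).1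
      = pvDropMeta ((PySem.Str.split? content "\n").getD []) := by
    simpa using (foldB_eq_dropMeta ((PySem.Str.split? content "\n").getD [])).1 []
  simp only [h1, h2, pvTrimSlice_eq_trimN, pvTrimN_eq_pops]
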